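-- pv_equiv track=rewrite | github.com/NataliFA/Python_Homework | HW_3/HW_3.py | negafibonachi
-- ===== SOURCE A (Python) =====
-- def negafibonachi(data):
--     negafib = []
--     for index in range(len(data) - 1, 0, -1):
--         if not index % 2:
--             negafib.append(data[index] * (-1))
--         else:
--             negafib.append(data[index])
--     return negafib
-- ===== SOURCE B (Python) =====
-- def negafibonachi(data):
--     res = data[::-1][:-1]
--     start = 0 if len(data) % 2 == 1 else 1
--     res[start::2] = [-x for x in res[start::2]]
--     return res
-- ===== Notes on version B (the rewrite author's own statement) =====
-- stated objective: alternative
-- what changed: Replaces the backwards index loop with per-element sign test by two slice passes: build the reversed tail with data[::-1][:-1], then negate every second element in place via the strided slice assignment res[start::2], with the start offset derived from len(data) parity.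
import Mathlib
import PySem

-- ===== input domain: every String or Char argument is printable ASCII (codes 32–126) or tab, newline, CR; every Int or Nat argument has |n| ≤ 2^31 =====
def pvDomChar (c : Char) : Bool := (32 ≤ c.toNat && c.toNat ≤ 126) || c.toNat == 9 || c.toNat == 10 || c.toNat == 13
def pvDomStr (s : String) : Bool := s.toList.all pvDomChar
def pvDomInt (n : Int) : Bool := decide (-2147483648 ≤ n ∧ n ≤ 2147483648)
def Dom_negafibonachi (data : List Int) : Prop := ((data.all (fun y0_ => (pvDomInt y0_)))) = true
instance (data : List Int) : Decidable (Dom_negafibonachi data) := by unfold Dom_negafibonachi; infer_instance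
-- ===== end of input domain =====

-- B re-implements A as two whole-list passes (reverse-slice, then strided negation) instead of the per-element indexed loop; objective: alternative decomposition.


-- ===== PORT A =====
-- data[index] is always in range (1 ≤ index ≤ len-1), so pyGetD's default 0 is never used
def negafibonachi (data : List Int) : List Int :=
  (PySem.List.pyRange ((data.length : Int) - 1) 0 (-1)).foldl
    (fun negafib index =>
      if PySem.Int.mod index 2 == 0 then negafib ++ [PySem.List.pyGetD data index 0 * (-1)]
      else negafib ++ [PySem.List.pyGetD data index 0]) []

-- ===== PORT B =====
-- B: res = data[::-1][:-1]; start = 0 if len(data) % 2 == 1 else 1;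
--    res[start::2] = [-x for x in res[start::2]]  — the strided slice assignment negates exactly
--    the positions j with j % 2 == start (start ∈ {0,1}), rendered as mapIdx.
def negafibonachi_alt (data : List Int) : List Int :=
  let res := (PySem.List.slice? data none none (-1)).getD []
  let res := PySem.List.slice res none (some (-1))
  let start : Nat := if data.length % 2 == 1 then 0 else 1
  res.mapIdx (fun j x => if j % 2 == start then -x else x)

-- ===== PRECONDITION & SPEC =====
def Spec_negafibonachi (data : List Int) (out : List Int) : Prop := out = negafibonachi_alt data
instance (data : List Int) (out : List Int) : Decidable (Spec_negafibonachi data out) := by unfold Spec_negafibonachi; infer_instance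

-- ===== CLAIM (what is proved, stated in full; the proofs are below) =====
def Claim_equal_negafibonachi : Prop := ∀ (data : List Int), Dom_negafibonachi data → Spec_negafibonachi data (negafibonachi data)

-- ===== LEMMAS AND PROOFS =====
-- loop shape of A: append-one-per-element with an if/else in each arm is a map
theorem foldl_append_ite {α β : Type} (p : α → Bool) (g h : α → β) (l : List α) (acc : List β) :
    List.foldl (fun acc x => if p x then acc ++ [g x] else acc ++ [h x]) acc l
      = acc ++ l.map (fun x => if p x then g x else h x) := by
  induction l generalizing acc with
  | nil => simp
  | cons y ys ih => simp only [List.foldl_cons, List.map_cons]; by_cases hy : p y <;>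
      simp [hy, ih, List.append_assoc]

-- ===== VERDICT (by name: the statement is the Claim_ definition above) =====
theorem negafibonachi_spec : Claim_equal_negafibonachi := by
  intro data _
  unfold Spec_negafibonachi negafibonachi negafibonachi_alt
  rw [foldl_append_ite, PySem.List.pyRange_neg_one, PySem.List.slice?_none_none_neg_one]
  simp only [Option.getD_some, PySem.List.slice_to_neg_one, List.map_map, List.nil_append]
  apply List.ext_getElem
  · simp; try omega
  · intro j hj hj'
    simp only [List.getElem_map, List.getElem_range, Function.comp_apply, List.getElem_mapIdx]
    have hlen : j < data.length - 1 := by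
      simpa [List.length_dropLast, List.length_reverse] using hj'
    have h1 : (0:Int) ≤ (data.length : Int) - 1 - (j:Int) := by
      have := hlen; omega
    have h2 : (data.length : Int) - 1 - (j:Int) < (data.length : Int) := by
      have := hlen; omega
    rw [PySem.Int.mod_eq_emod_of_pos (by norm_num),
        PySem.List.pyGetD_eq_getElem data 0 h1 h2]
    rw [List.getElem_dropLast, List.getElem_reverse]
    have hidx : ((data.length : Int) - 1 - (j:Int)).toNat = data.length - 1 - j := by omega
    have hcond : ((((data.length : Int) - 1 - (j:Int)) % 2 == 0) : Bool)
        = ((j % 2 == if data.length % 2 == 1 then 0 else 1) : Bool) := by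
      rw [Bool.eq_iff_iff]
      simp only [beq_iff_eq]
      split_ifs with hpar <;> omega
    simp only [hidx, hcond]
    by_cases hc : (j % 2 == if data.length % 2 == 1 then 0 else 1) = true <;>
      simp only [hc, if_true, if_false, Bool.false_eq_true] <;> ring
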